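-- pv_equiv track=rewrite | github.com/eAlasdair/UC-degree-points | degreepoints_v2_all/prog_degreepoints_v2.py | calculate_points_achieved_science
-- ===== SOURCE A (Python) =====
-- SCIENCE_NON_SCI_POINT_LIMIT = 105
--
-- def calculate_points_achieved_science(points_summary, hundred_level):
--     """
--     Calculates the information needed to determine progress, returns lists
--     remember points_summary comes in form [major_points, degree_points, other]
--     """
--     total_points = 0
--     total_100_level = 0
--     total_200_level = 0
--     total_300_level = 0
--     total_400_level = 0
--     total_500_level = 0
--
--     if hundred_level > 0:
--         total_100_level = points_summary[0][0] + points_summary[1][0] + points_summary[2][0]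
--     if hundred_level > 1:
--         total_200_level = points_summary[0][1] + points_summary[1][1] + points_summary[2][1]
--     if hundred_level > 2:
--         total_300_level = points_summary[0][2] + points_summary[1][2] + points_summary[2][2]
--     if hundred_level > 3:
--         total_400_level = points_summary[0][3] + points_summary[1][3] + points_summary[2][3]
--     if hundred_level > 4:
--         total_500_level = points_summary[0][4] + points_summary[1][4] + points_summary[2][4]
--
--     total_for_major_all_levels = 0
--     total_for_degree_all_levels = 0
--     total_for_other_all_levels = 0
--
--     total_degree_above_100_level = 0
--     total_major_above_100_level = 0
--     total_other_above_100_level = 0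
--
--     total_for_major_300_level = 0
--     total_for_degree_300_level = 0
--     total_for_other_300_level = 0
--
--     for i in range(hundred_level):
--         total_points += sum(points_summary[i])
--         total_for_degree_all_levels += (points_summary[0][i] + points_summary[1][i])
--         total_for_major_all_levels += points_summary[0][i]
--         total_for_other_all_levels += points_summary[2][i]
--         if i > 0:
--             total_degree_above_100_level += (points_summary[0][i] + points_summary[1][i])
--             total_major_above_100_level += points_summary[0][i]
--             total_other_above_100_level += points_summary[2][i]
--         if i >= 2:
--             total_for_degree_300_level += (points_summary[0][i] + points_summary[1][i])
--             total_for_major_300_level += points_summary[0][i]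
--             total_for_other_300_level += points_summary[2][i]
--
--     if total_for_other_all_levels <= SCIENCE_NON_SCI_POINT_LIMIT:
--         total_for_degree_all_levels += total_for_other_all_levels
--     else:
--         total_for_degree_all_levels += SCIENCE_NON_SCI_POINT_LIMIT
--
--     if total_other_above_100_level <= SCIENCE_NON_SCI_POINT_LIMIT:
--         total_degree_above_100_level += total_other_above_100_level
--     else:
--         total_degree_above_100_level += SCIENCE_NON_SCI_POINT_LIMIT
--
--     if total_for_other_300_level <= SCIENCE_NON_SCI_POINT_LIMIT:
--         total_for_degree_300_level += total_for_other_300_level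
--     else:
--         total_for_degree_300_level += SCIENCE_NON_SCI_POINT_LIMIT
--
--     points_per_level = [
--         total_100_level,
--         total_200_level,
--         total_300_level,
--         total_400_level,
--         total_500_level
--         ]
--
--     total_points_all_levels = [
--         total_for_degree_all_levels,
--         total_for_major_all_levels,
--         total_for_other_all_levels
--         ]
--
--     total_points_above_100_level = [
--         total_degree_above_100_level,
--         total_major_above_100_level,
--         total_other_above_100_level
--         ]
--
--     total_points_300_level = [
--         total_for_degree_300_level,
--         total_for_major_300_level,
--         total_for_other_300_level
--         ]
--
--     science_point_summary = [
--         points_per_level,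
--         total_points_all_levels,
--         total_points_above_100_level,
--         total_points_300_level
--         ]
--
--     return(science_point_summary)
-- ===== SOURCE B (Python) =====
-- SCIENCE_NON_SCI_POINT_LIMIT = 105
--
-- def calculate_points_achieved_science(points_summary, hundred_level):
--     """Same result via three per-contributor lists over the active levels and slice sums."""
--     n = hundred_level if hundred_level > 0 else 0
--     major = [points_summary[0][i] for i in range(n)]
--     degree = [points_summary[0][i] + points_summary[1][i] for i in range(n)]
--     other = [points_summary[2][i] for i in range(n)]
--
--     def block(m, d, o):
--         return [sum(d) + min(sum(o), SCIENCE_NON_SCI_POINT_LIMIT), sum(m), sum(o)]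
--
--     points_per_level = [degree[k] + other[k] if k < n else 0 for k in range(5)]
--     return [
--         points_per_level,
--         block(major, degree, other),
--         block(major[1:], degree[1:], other[1:]),
--         block(major[2:], degree[2:], other[2:]),
--     ]
-- ===== Notes on version B (the rewrite author's own statement) =====
-- stated objective: simpler
-- what changed: Replaces A's ten scalar loop accumulators, five copy-pasted per-level if-blocks and three clamp branches by three per-contributor lists built once over the active levels, with the four output rows obtained as slice sums (drop 1 / drop 2) and a min() clamp.
-- crash fix: When 0 < hundred_level <= each of the first three rows' lengths but hundred_level > len(points_summary), A raises IndexError from the loop's unused sum(points_summary[i]) while B returns the summary. — e.g. on calculate_points_achieved_science([[1, 2, 3, 4], [0, 0, 0, 0], [0, 0, 0, 0]], 4): A raises IndexError, B returns [[1, 2, 3, 4, 0], [10, 10, 0], [9, 9, 0], [7, 7, 0]]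
import Mathlib
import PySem

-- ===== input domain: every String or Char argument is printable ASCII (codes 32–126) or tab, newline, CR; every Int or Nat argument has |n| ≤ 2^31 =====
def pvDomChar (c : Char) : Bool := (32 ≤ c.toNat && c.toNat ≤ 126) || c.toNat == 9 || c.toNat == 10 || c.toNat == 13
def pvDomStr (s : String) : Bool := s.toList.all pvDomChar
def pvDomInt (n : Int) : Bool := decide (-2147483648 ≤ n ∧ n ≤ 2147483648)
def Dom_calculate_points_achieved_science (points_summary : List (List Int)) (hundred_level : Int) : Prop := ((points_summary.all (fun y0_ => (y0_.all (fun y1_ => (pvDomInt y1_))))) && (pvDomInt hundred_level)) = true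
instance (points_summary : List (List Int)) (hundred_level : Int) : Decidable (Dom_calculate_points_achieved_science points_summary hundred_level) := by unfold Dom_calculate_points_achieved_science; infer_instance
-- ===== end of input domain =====

-- B replaces A's ten scalar accumulators and five copy-pasted per-level blocks by three
-- per-contributor lists over the active levels and slice sums (objective: simpler).

-- ===== PORT A =====
-- points_summary[j][i] with nonnegative indices, as A uses it
def pvGet (ps : List (List Int)) (j i : Int) : Int :=
  PySem.List.pyGetD (PySem.List.pyGetD ps j []) i 0

-- the ten loop accumulators of A, in source order
structure PVSt where
  tp : Int
  td : Int
  tm : Int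
  tot : Int
  d1 : Int
  m1 : Int
  o1 : Int
  d3 : Int
  m3 : Int
  o3 : Int
deriving DecidableEq

-- one iteration of A's 'for i in range(hundred_level)' loop
def pvStepA (ps : List (List Int)) (s : PVSt) (i : Int) : PVSt :=
  { tp := s.tp + (PySem.List.pyGetD ps i []).sum
    td := s.td + (pvGet ps 0 i + pvGet ps 1 i)
    tm := s.tm + pvGet ps 0 i
    tot := s.tot + pvGet ps 2 i
    d1 := if i > 0 then s.d1 + (pvGet ps 0 i + pvGet ps 1 i) else s.d1
    m1 := if i > 0 then s.m1 + pvGet ps 0 i else s.m1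
    o1 := if i > 0 then s.o1 + pvGet ps 2 i else s.o1
    d3 := if i ≥ 2 then s.d3 + (pvGet ps 0 i + pvGet ps 1 i) else s.d3
    m3 := if i ≥ 2 then s.m3 + pvGet ps 0 i else s.m3
    o3 := if i ≥ 2 then s.o3 + pvGet ps 2 i else s.o3 }

def calculate_points_achieved_science (points_summary : List (List Int)) (hundred_level : Int) : List (List Int) :=
  let t100 := if hundred_level > 0 then pvGet points_summary 0 0 + pvGet points_summary 1 0 + pvGet points_summary 2 0 else 0
  let t200 := if hundred_level > 1 then pvGet points_summary 0 1 + pvGet points_summary 1 1 + pvGet points_summary 2 1 else 0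
  let t300 := if hundred_level > 2 then pvGet points_summary 0 2 + pvGet points_summary 1 2 + pvGet points_summary 2 2 else 0
  let t400 := if hundred_level > 3 then pvGet points_summary 0 3 + pvGet points_summary 1 3 + pvGet points_summary 2 3 else 0
  let t500 := if hundred_level > 4 then pvGet points_summary 0 4 + pvGet points_summary 1 4 + pvGet points_summary 2 4 else 0
  let s := (PySem.List.pyRange 0 hundred_level 1).foldl (pvStepA points_summary) ⟨0,0,0,0,0,0,0,0,0,0⟩
  let td := if s.tot ≤ 105 then s.td + s.tot else s.td + 105
  let d1 := if s.o1 ≤ 105 then s.d1 + s.o1 else s.d1 + 105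
  let d3 := if s.o3 ≤ 105 then s.d3 + s.o3 else s.d3 + 105
  [[t100, t200, t300, t400, t500], [td, s.tm, s.tot], [d1, s.m1, s.o1], [d3, s.m3, s.o3]]

-- ===== PORT B =====
def calculate_points_achieved_science_alt (points_summary : List (List Int)) (hundred_level : Int) : List (List Int) :=
  let n : Nat := if hundred_level > 0 then hundred_level.toNat else 0
  let major := (List.range n).map (fun i => (points_summary.getD 0 []).getD i 0)
  let degree := (List.range n).map (fun i => (points_summary.getD 0 []).getD i 0 + (points_summary.getD 1 []).getD i 0)
  let other := (List.range n).map (fun i => (points_summary.getD 2 []).getD i 0)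
  let block := fun (m d o : List Int) => [d.sum + min o.sum 105, m.sum, o.sum]
  let points_per_level := (List.range 5).map (fun k => if k < n then degree.getD k 0 + other.getD k 0 else 0)
  [points_per_level,
   block major degree other,
   block (major.drop 1) (degree.drop 1) (other.drop 1),
   block (major.drop 2) (degree.drop 2) (other.drop 2)]

-- ===== PRECONDITION & SPEC =====
-- Pre_ excludes exactly the inputs on which A raises IndexError: a positive hundred_level
-- needs rows 0..2 of length ≥ hundred_level and, because the loop's dead 'sum(points_summary[i])'
-- indexes row i, also len(points_summary) ≥ hundred_level.
def Pre_calculate_points_achieved_science (points_summary : List (List Int)) (hundred_level : Int) : Prop :=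
  hundred_level ≤ 0 ∨
    (hundred_level ≤ (points_summary.length : Int) ∧ 3 ≤ points_summary.length ∧
     hundred_level ≤ ((points_summary.getD 0 []).length : Int) ∧
     hundred_level ≤ ((points_summary.getD 1 []).length : Int) ∧
     hundred_level ≤ ((points_summary.getD 2 []).length : Int))
instance (points_summary : List (List Int)) (hundred_level : Int) : Decidable (Pre_calculate_points_achieved_science points_summary hundred_level) := by unfold Pre_calculate_points_achieved_science; infer_instance

def pvWitness_calculate_points_achieved_science : List (List Int) × Int :=
  ([[10, 20, 30], [5, 5, 5], [100, 10, 10]], 3)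

-- A raises IndexError (the loop's unused 'sum(points_summary[i])' runs past the three rows)
-- whenever 0 < hundred_level ≤ each row's length but hundred_level > len(points_summary); B returns the summary there
-- (proved below in calculate_points_achieved_science_raises).
def Raises_calculate_points_achieved_science (points_summary : List (List Int)) (hundred_level : Int) : Prop :=
  0 < hundred_level ∧ (points_summary.length : Int) < hundred_level ∧ 3 ≤ points_summary.length ∧
    hundred_level ≤ ((points_summary.getD 0 []).length : Int) ∧
    hundred_level ≤ ((points_summary.getD 1 []).length : Int) ∧
    hundred_level ≤ ((points_summary.getD 2 []).length : Int)
instance (points_summary : List (List Int)) (hundred_level : Int) : Decidable (Raises_calculate_points_achieved_science points_summary hundred_level) := by unfold Raises_calculate_points_achieved_science; infer_instance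

def pvRaiseWitness_calculate_points_achieved_science : List (List Int) × Int :=
  ([[1, 2, 3, 4], [0, 0, 0, 0], [0, 0, 0, 0]], 4)
def pvRaiseWitnessOut_calculate_points_achieved_science : List (List Int) :=
  [[1, 2, 3, 4, 0], [10, 10, 0], [9, 9, 0], [7, 7, 0]]

def Spec_calculate_points_achieved_science (points_summary : List (List Int)) (hundred_level : Int) (out : List (List Int)) : Prop := out = calculate_points_achieved_science_alt points_summary hundred_level
instance (points_summary : List (List Int)) (hundred_level : Int) (out : List (List Int)) : Decidable (Spec_calculate_points_achieved_science points_summary hundred_level out) := by unfold Spec_calculate_points_achieved_science; infer_instance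

-- ===== CLAIM (what is proved, stated in full; the proofs are below) =====
def Claim_equal_calculate_points_achieved_science : Prop := ∀ (points_summary : List (List Int)) (hundred_level : Int), Dom_calculate_points_achieved_science points_summary hundred_level → Pre_calculate_points_achieved_science points_summary hundred_level → Spec_calculate_points_achieved_science points_summary hundred_level (calculate_points_achieved_science points_summary hundred_level)

def Claim_raises_calculate_points_achieved_science : Prop := (∀ (points_summary : List (List Int)) (hundred_level : Int), Dom_calculate_points_achieved_science points_summary hundred_level → Raises_calculate_points_achieved_science points_summary hundred_level → ¬ Pre_calculate_points_achieved_science points_summary hundred_level) ∧ (Dom_calculate_points_achieved_science (pvRaiseWitness_calculate_points_achieved_science.1) (pvRaiseWitness_calculate_points_achieved_science.2) ∧ Raises_calculate_points_achieved_science (pvRaiseWitness_calculate_points_achieved_science.1) (pvRaiseWitness_calculate_points_achieved_science.2) ∧ calculate_points_achieved_science_alt (pvRaiseWitness_calculate_points_achieved_science.1) (pvRaiseWitness_calculate_points_achieved_science.2) = pvRaiseWitnessOut_calculate_points_achieved_science)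

-- ===== LEMMAS AND PROOFS =====

-- the three per-level contributions, as B lists them
def pvM (ps : List (List Int)) (i : Nat) : Int := (ps.getD 0 []).getD i 0
def pvD (ps : List (List Int)) (i : Nat) : Int := (ps.getD 0 []).getD i 0 + (ps.getD 1 []).getD i 0
def pvO (ps : List (List Int)) (i : Nat) : Int := (ps.getD 2 []).getD i 0

-- closed form of A's loop: every accumulator is a (conditional) sum over range n
theorem pvFoldA (ps : List (List Int)) (n : Nat) (s : PVSt) :
    (PySem.List.pyRange 0 (n : Int) 1).foldl (pvStepA ps) s =
    { tp := s.tp + ((List.range n).map (fun i => (ps.getD i []).sum)).sum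
      td := s.td + ((List.range n).map (pvD ps)).sum
      tm := s.tm + ((List.range n).map (pvM ps)).sum
      tot := s.tot + ((List.range n).map (pvO ps)).sum
      d1 := s.d1 + ((List.range n).map (fun i => if 1 ≤ i then pvD ps i else 0)).sum
      m1 := s.m1 + ((List.range n).map (fun i => if 1 ≤ i then pvM ps i else 0)).sum
      o1 := s.o1 + ((List.range n).map (fun i => if 1 ≤ i then pvO ps i else 0)).sum
      d3 := s.d3 + ((List.range n).map (fun i => if 2 ≤ i then pvD ps i else 0)).sum
      m3 := s.m3 + ((List.range n).map (fun i => if 2 ≤ i then pvM ps i else 0)).sum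
      o3 := s.o3 + ((List.range n).map (fun i => if 2 ≤ i then pvO ps i else 0)).sum } := by
  induction n with
  | zero => simp [PySem.List.pyRange_one_eq_nil]
  | succ n ih =>
      rw [show ((n + 1 : Nat) : Int) = (n : Int) + 1 by push_cast; ring,
          PySem.List.pyRange_one_succ_right (by positivity), List.foldl_append, ih]
      simp only [List.foldl, pvStepA, pvGet, pvM, pvD, pvO, List.range_succ, List.map_append,
        List.map_cons, List.map_nil, List.sum_append, List.sum_cons, List.sum_nil,
        PySem.List.pyGetD_natCast, PySem.List.pyGetD_ofNat']
      congr 1 <;> (try split_ifs) <;> (try (exfalso; omega)) <;> ring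

-- a slice sum is a guarded full sum: sum of (map f (range n)).drop k
theorem pvDropSum (f : Nat → Int) (n k : Nat) :
    (((List.range n).map f).drop k).sum = ((List.range n).map (fun i => if k ≤ i then f i else 0)).sum := by
  induction n with
  | zero => simp
  | succ n ih =>
      by_cases h : k ≤ n
      · rw [List.range_succ, List.map_append, List.drop_append_of_le_length (by simpa using h)]
        simp [ih, h]
      · rw [List.drop_of_length_le (by simp; omega)]
        refine (List.sum_eq_zero ?_).symm
        intro x hx
        simp only [List.mem_map, List.mem_range] at hx
        obtain ⟨i, hi, rfl⟩ := hx
        simp [show ¬ k ≤ i by omega]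

-- ===== VERDICT (by name: the statement is the Claim_ definition above) =====
theorem calculate_points_achieved_science_spec : Claim_equal_calculate_points_achieved_science := by
  intro ps hl _ hpre
  unfold Spec_calculate_points_achieved_science
  by_cases h0 : hl ≤ 0
  · simp [calculate_points_achieved_science, calculate_points_achieved_science_alt,
      PySem.List.pyRange_one_eq_nil h0, show ¬ hl > 0 by omega,
      show ¬ hl > 1 by omega, show ¬ hl > 2 by omega, show ¬ hl > 3 by omega,
      show ¬ hl > 4 by omega]
  · -- positive hundred_level: hl = n for some n > 0
    obtain ⟨n, rfl⟩ : ∃ n : Nat, hl = (n : Int) := ⟨hl.toNat, by omega⟩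
    have hn : 0 < n := by omega
    simp only [calculate_points_achieved_science, calculate_points_achieved_science_alt,
      pvFoldA, Int.toNat_natCast, zero_add, pvGet,
      PySem.List.pyGetD_ofNat']
    have hn' : ((n : Int) > 0) = True := eq_true (by exact_mod_cast hn)
    have hclamp : ∀ d o : Int, (if o ≤ 105 then d + o else d + 105) = d + min o 105 := by
      intro d o; split_ifs with h <;> omega
    simp only [hn', if_true,
      show pvD ps = fun i => (ps.getD 0 []).getD i 0 + (ps.getD 1 []).getD i 0 from rfl,
      show pvM ps = fun i => (ps.getD 0 []).getD i 0 from rfl,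
      show pvO ps = fun i => (ps.getD 2 []).getD i 0 from rfl,
      pvDropSum, hclamp, List.cons.injEq, and_true]
    rw [show List.range 5 = [0, 1, 2, 3, 4] by decide]
    simp only [List.map_cons, List.map_nil, List.cons.injEq, and_true]
    refine ⟨?_, ?_, ?_, ?_, ?_⟩ <;>
      · split_ifs <;>
        first
          | rfl
          | (exfalso; omega)
          | rw [PySem.List.getD_map_range _ _ _ _ (by omega), PySem.List.getD_map_range _ _ _ _ (by omega)]

@[simp] theorem calculate_points_achieved_science_raises : Claim_raises_calculate_points_achieved_science := by
  unfold Claim_raises_calculate_points_achieved_science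
  refine ⟨?_, by decide⟩
  intro ps hl _ hr hpre
  unfold Raises_calculate_points_achieved_science at hr
  unfold Pre_calculate_points_achieved_science at hpre
  omega
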